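-- pv_equiv track=rewrite | github.com/rhildred/SimpleDjangoTestExamples | final/Q08.py | translate_to_pig_latin
-- ===== SOURCE A (Python) =====
-- def translate_to_pig_latin(sInput):
--     aInput = sInput.split(" ")
--
--     sOutput = ""
--
--     for sWord in aInput:
--         nFirst = 0
--         for ch in sWord:
--             if ch in "aeiou":
--                 break
--             else:
--                 nFirst += 1
--         if sOutput != "":
--             sOutput += " "
--         sOutput += sWord[nFirst:len(sWord)] + sWord[:nFirst] + "ay"
--     return sOutput
-- ===== SOURCE B (Python) =====
-- def translate_to_pig_latin(sInput):
--     out = []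
--     pre = []   # leading consonants of the word being scanned
--     rest = []  # the word from its first vowel on
--     for ch in sInput:
--         if ch == ' ':
--             out += rest
--             out += pre
--             out += 'ay '
--             pre = []
--             rest = []
--         elif rest or ch in "aeiou":
--             rest.append(ch)
--         else:
--             pre.append(ch)
--     out += rest
--     out += pre
--     out += 'ay'
--     return ''.join(out)
-- ===== Notes on version B (the rewrite author's own statement) =====
-- stated objective: alternative
-- what changed: Replaces A's split-into-words plus per-word rescan-and-slice strategy by a single left-to-right character pass: a state machine with a consonant-prefix buffer and a rest buffer that is flushed (rest+pre+'ay') at every space and at the end, so no split, no index counting and no slicing occur.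
import Mathlib
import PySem

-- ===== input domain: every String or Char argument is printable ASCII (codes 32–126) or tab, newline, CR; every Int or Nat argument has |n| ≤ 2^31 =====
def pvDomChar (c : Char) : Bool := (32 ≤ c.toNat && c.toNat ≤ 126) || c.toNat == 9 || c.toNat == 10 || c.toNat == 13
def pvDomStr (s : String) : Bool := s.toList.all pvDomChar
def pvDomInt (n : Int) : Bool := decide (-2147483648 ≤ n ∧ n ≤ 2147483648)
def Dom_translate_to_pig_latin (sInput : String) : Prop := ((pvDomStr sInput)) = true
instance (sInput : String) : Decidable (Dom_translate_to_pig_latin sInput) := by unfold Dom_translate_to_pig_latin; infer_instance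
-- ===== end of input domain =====

-- B replaces A's split-then-rescan-each-word strategy by a single left-to-right character
-- state machine (consonant buffer / rest buffer, flushed at spaces); alternative, same cost.

-- ===== PORT A =====

-- 'ch in "aeiou"' for a single character = membership in the five vowels
def pvIsVowel (ch : Char) : Bool := "aeiou".toList.contains ch

-- the inner 'for ch in sWord: if ch in "aeiou": break else nFirst += 1' loop
def pvNFirstLoop : List Char → Nat
  | [] => 0
  | ch :: rest => if pvIsVowel ch then 0 else 1 + pvNFirstLoop rest

def translate_to_pig_latin (sInput : String) : String :=
  let aInput := PySem.Chars.splitOn sInput.toList [' ']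
  String.ofList (aInput.foldl (fun sOutput sWord =>
    let nFirst := pvNFirstLoop sWord
    let sOutput := if sOutput ≠ [] then sOutput ++ [' '] else sOutput
    sOutput ++ PySem.Chars.slice sWord (some (nFirst : Int)) (some (sWord.length : Int))
            ++ PySem.Chars.slice sWord none (some (nFirst : Int)) ++ ['a', 'y']) [])

-- ===== PORT B =====

-- one loop iteration of B's state machine: state = (out, pre, rest)
def pvStep (st : List Char × List Char × List Char) (ch : Char) :
    List Char × List Char × List Char :=
  if ch = ' ' then (st.1 ++ st.2.2 ++ st.2.1 ++ ['a', 'y', ' '], [], [])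
  else if st.2.2 ≠ [] ∨ pvIsVowel ch then (st.1, st.2.1, st.2.2 ++ [ch])
  else (st.1, st.2.1 ++ [ch], st.2.2)

def translate_to_pig_latin_alt (sInput : String) : String :=
  let st := sInput.toList.foldl pvStep ([], [], [])
  String.ofList (st.1 ++ st.2.2 ++ st.2.1 ++ ['a', 'y'])

-- ===== PRECONDITION & SPEC =====
def Spec_translate_to_pig_latin (sInput : String) (out : String) : Prop := out = translate_to_pig_latin_alt sInput
instance (sInput : String) (out : String) : Decidable (Spec_translate_to_pig_latin sInput out) := by unfold Spec_translate_to_pig_latin; infer_instance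

-- ===== CLAIM (what is proved, stated in full; the proofs are below) =====
def Claim_equal_translate_to_pig_latin : Prop := ∀ (sInput : String), Dom_translate_to_pig_latin sInput → Spec_translate_to_pig_latin sInput (translate_to_pig_latin sInput)

-- ===== LEMMAS AND PROOFS =====

-- the reference translation of one word
def pvPig (w : List Char) : List Char :=
  w.drop (pvNFirstLoop w) ++ w.take (pvNFirstLoop w) ++ ['a', 'y']

-- structural recursion computing split on a single space
def pvSplit : List Char → List (List Char)
  | [] => [[]]
  | c :: rest =>
    if c = ' ' then [] :: pvSplit rest
    else match pvSplit rest with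
      | [] => [[c]]
      | p :: ps => (c :: p) :: ps

lemma pvSplit_ne_nil (l : List Char) : pvSplit l ≠ [] := by
  cases l with
  | nil => simp [pvSplit]
  | cons c rest =>
    simp only [pvSplit]
    split_ifs
    · simp
    · cases h : pvSplit rest <;> simp

-- splitOn.go on a single-space separator computes pvSplit
lemma pvSplitOn_go (fuel : Nat) :
    ∀ (l cur : List Char) (acc : List (List Char)), l.length < fuel →
      PySem.Chars.splitOn.go [' '] fuel l cur acc
        = acc.reverse ++ (cur.reverse ++ (pvSplit l).headI) :: (pvSplit l).tail := by
  induction fuel with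
  | zero => intro l cur acc h; omega
  | succ f ih =>
    intro l cur acc h
    cases l with
    | nil => simp [PySem.Chars.splitOn.go, pvSplit]
    | cons c rest =>
      by_cases hc : c = ' '
      · subst hc
        rw [show PySem.Chars.splitOn.go [' '] (f + 1) (' ' :: rest) cur acc
            = PySem.Chars.splitOn.go [' '] f rest [] (cur.reverse :: acc) by
          simp [PySem.Chars.splitOn.go, List.isPrefixOf]]
        rw [ih rest [] (cur.reverse :: acc) (by simpa using h)]
        have hne := pvSplit_ne_nil rest
        cases hsp : pvSplit rest with
        | nil => exact absurd hsp hne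
        | cons p ps => simp [pvSplit, hsp]
      · rw [show PySem.Chars.splitOn.go [' '] (f + 1) (c :: rest) cur acc
            = PySem.Chars.splitOn.go [' '] f rest (c :: cur) acc by
          simp [PySem.Chars.splitOn.go, List.isPrefixOf, Ne.symm hc]]
        rw [ih rest (c :: cur) acc (by simpa using h)]
        have hne := pvSplit_ne_nil rest
        cases hsp : pvSplit rest with
        | nil => exact absurd hsp hne
        | cons p ps => simp [pvSplit, hc, hsp]

lemma pvSplitOn_eq (l : List Char) : PySem.Chars.splitOn l [' '] = pvSplit l := by
  rw [PySem.Chars.splitOn, pvSplitOn_go (l.length + 1) l [] [] (by omega)]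
  have hne := pvSplit_ne_nil l
  cases hsp : pvSplit l with
  | nil => exact absurd hsp hne
  | cons p ps => simp

-- A's per-word slice expression equals pvPig
lemma pvStep_eq (w : List Char) :
    PySem.Chars.slice w (some ((pvNFirstLoop w : Nat) : Int)) (some ((w.length : Nat) : Int))
      ++ PySem.Chars.slice w none (some ((pvNFirstLoop w : Nat) : Int)) ++ ['a', 'y'] = pvPig w := by
  unfold pvPig
  simp only [PySem.Chars.slice_eq_listSlice, PySem.List.slice_natCast,
    PySem.List.slice_to_natCast]
  have : (w.drop (pvNFirstLoop w)).take (w.length - pvNFirstLoop w) = w.drop (pvNFirstLoop w) := by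
    apply List.take_of_length_le
    simp
  rw [this]

lemma pvPig_ne_nil (w : List Char) : pvPig w ≠ [] := by
  unfold pvPig
  simp

-- A's fold with separator bookkeeping, once the accumulator is nonempty
lemma pvFold_sep (ws : List (List Char)) :
    ∀ acc : List Char, acc ≠ [] →
      ws.foldl (fun sOutput sWord =>
        let nFirst := pvNFirstLoop sWord
        let sOutput := if sOutput ≠ [] then sOutput ++ [' '] else sOutput
        sOutput ++ PySem.Chars.slice sWord (some (nFirst : Int)) (some (sWord.length : Int))
                ++ PySem.Chars.slice sWord none (some (nFirst : Int)) ++ ['a', 'y']) acc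
      = acc ++ ws.flatMap (fun w => ' ' :: pvPig w) := by
  induction ws with
  | nil => intro acc _; simp
  | cons w ws ih =>
    intro acc hacc
    simp only [List.foldl_cons, List.flatMap_cons]
    rw [if_pos hacc]
    have hstep : acc ++ [' ']
        ++ PySem.Chars.slice w (some ((pvNFirstLoop w : Nat) : Int)) (some ((w.length : Nat) : Int))
        ++ PySem.Chars.slice w none (some ((pvNFirstLoop w : Nat) : Int)) ++ ['a', 'y']
        = acc ++ (' ' :: pvPig w) := by
      rw [show acc ++ [' ']
          ++ PySem.Chars.slice w (some ((pvNFirstLoop w : Nat) : Int)) (some ((w.length : Nat) : Int))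
          ++ PySem.Chars.slice w none (some ((pvNFirstLoop w : Nat) : Int)) ++ ['a', 'y']
          = acc ++ [' ']
          ++ (PySem.Chars.slice w (some ((pvNFirstLoop w : Nat) : Int)) (some ((w.length : Nat) : Int))
          ++ PySem.Chars.slice w none (some ((pvNFirstLoop w : Nat) : Int)) ++ ['a', 'y']) by simp,
        pvStep_eq]
      simp
    rw [hstep, ih (acc ++ (' ' :: pvPig w)) (by simp)]
    simp

-- join with a single-space separator as a flatMap past the first word
lemma pvJoin_flatMap (w : List Char) (ws : List (List Char)) :
    PySem.Chars.join [' '] (w :: ws) = w ++ ws.flatMap (fun v => ' ' :: v) := by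
  induction ws generalizing w with
  | nil => simp [PySem.Chars.join_singleton]
  | cons v vs ih =>
    rw [PySem.Chars.join_cons_cons, ih v]
    simp

-- B's word-level transition (the non-space branch of pvStep on the (pre, rest) components)
def pvWordStep (st : List Char × List Char) (ch : Char) : List Char × List Char :=
  if st.2 ≠ [] ∨ pvIsVowel ch then (st.1, st.2 ++ [ch]) else (st.1 ++ [ch], st.2)

lemma pvStep_nonspace (out pre rest : List Char) (c : Char) (hc : c ≠ ' ') :
    pvStep (out, pre, rest) c = (out, pvWordStep (pre, rest) c) := by
  unfold pvStep pvWordStep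
  rw [if_neg hc]
  split_ifs <;> rfl

lemma pvWordFold_rest (w : List Char) :
    ∀ pre rest : List Char, rest ≠ [] →
      w.foldl pvWordStep (pre, rest) = (pre, rest ++ w) := by
  induction w with
  | nil => intro pre rest _; simp
  | cons c cs ih =>
    intro pre rest h
    simp only [List.foldl_cons]
    rw [show pvWordStep (pre, rest) c = (pre, rest ++ [c]) by
      unfold pvWordStep; rw [if_pos (Or.inl h)]]
    rw [ih pre (rest ++ [c]) (by simp)]
    simp

lemma pvWordFold (w : List Char) :
    ∀ pre : List Char,
      w.foldl pvWordStep (pre, []) = (pre ++ w.take (pvNFirstLoop w), w.drop (pvNFirstLoop w)) := by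
  induction w with
  | nil => intro pre; simp [pvNFirstLoop]
  | cons c cs ih =>
    intro pre
    by_cases hv : pvIsVowel c
    · simp only [List.foldl_cons]
      rw [show pvWordStep (pre, []) c = (pre, [c]) by unfold pvWordStep; simp [hv]]
      rw [pvWordFold_rest cs pre [c] (by simp)]
      simp [pvNFirstLoop, hv]
    · simp only [List.foldl_cons]
      rw [show pvWordStep (pre, []) c = (pre ++ [c], []) by unfold pvWordStep; simp [hv]]
      rw [ih (pre ++ [c])]
      simp [pvNFirstLoop, hv, List.take_cons, List.drop_cons]

-- the final flush of B's state
def pvFinish (st : List Char × List Char × List Char) : List Char :=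
  st.1 ++ st.2.2 ++ st.2.1 ++ ['a', 'y']

-- the main invariant of B's single pass
lemma pvMain (l : List Char) :
    ∀ (out w : List Char),
      pvFinish (l.foldl pvStep (out, w.foldl pvWordStep ([], []))) =
        out ++ PySem.Chars.join [' ']
          (((w ++ (pvSplit l).headI) :: (pvSplit l).tail).map pvPig) := by
  induction l with
  | nil =>
    intro out w
    rw [pvWordFold w []]
    simp [pvFinish, pvSplit, PySem.Chars.join_singleton, pvPig]
  | cons c rest ih =>
    intro out w
    by_cases hc : c = ' '
    · subst hc
      simp only [List.foldl_cons]
      rw [show pvStep (out, w.foldl pvWordStep ([], [])) ' '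
          = (out ++ (w.foldl pvWordStep ([], [])).2 ++ (w.foldl pvWordStep ([], [])).1
              ++ ['a', 'y', ' '], [], []) by unfold pvStep; simp]
      have hI := ih (out ++ (w.foldl pvWordStep ([], [])).2 ++ (w.foldl pvWordStep ([], [])).1
          ++ ['a', 'y', ' ']) []
      simp only [List.foldl_nil] at hI
      rw [hI, pvWordFold w []]
      have hne := pvSplit_ne_nil rest
      cases hsp : pvSplit rest with
      | nil => exact absurd hsp hne
      | cons p ps =>
        rw [show pvSplit (' ' :: rest) = [] :: p :: ps by simp [pvSplit, hsp]]
        simp only [List.headI, List.tail, List.map_cons, List.append_nil]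
        rw [PySem.Chars.join_cons_cons]
        simp [pvPig]
    · simp only [List.foldl_cons]
      rw [pvStep_nonspace _ _ _ c hc]
      rw [show pvWordStep ((w.foldl pvWordStep ([], [])).1, (w.foldl pvWordStep ([], [])).2) c
          = (w ++ [c]).foldl pvWordStep ([], []) by rw [List.foldl_append]; simp]
      rw [ih out (w ++ [c])]
      have hne := pvSplit_ne_nil rest
      cases hsp : pvSplit rest with
      | nil => exact absurd hsp hne
      | cons p ps =>
        simp [pvSplit, hc, hsp]

-- ===== VERDICT (by name: the statement is the Claim_ definition above) =====
theorem translate_to_pig_latin_spec : Claim_equal_translate_to_pig_latin := by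
  intro sInput _
  unfold Spec_translate_to_pig_latin translate_to_pig_latin translate_to_pig_latin_alt
  rw [pvSplitOn_eq]
  have hB := pvMain sInput.toList [] []
  simp only [List.foldl_nil, List.nil_append] at hB
  simp only [pvFinish] at hB
  simp only [ne_eq]
  rw [hB]
  have hne := pvSplit_ne_nil sInput.toList
  cases hsp : pvSplit sInput.toList with
  | nil => exact absurd hsp hne
  | cons p ps =>
    simp only [List.headI, List.tail, List.nil_append, List.map_cons, List.foldl_cons]
    rw [pvJoin_flatMap (pvPig p) (ps.map pvPig)]
    simp only [not_true_eq_false, if_false, List.nil_append]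
    rw [show PySem.Chars.slice p (some ((pvNFirstLoop p : Nat) : Int)) (some ((p.length : Nat) : Int))
        ++ PySem.Chars.slice p none (some ((pvNFirstLoop p : Nat) : Int)) ++ ['a', 'y'] = pvPig p
      from pvStep_eq p]
    rw [pvFold_sep ps (pvPig p) (pvPig_ne_nil p)]
    simp [List.flatMap_map]
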